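-- pv_equiv track=rewrite | github.com/edcrfv458/programmers | 프로그래머스/0/181837. 커피 심부름/커피 심부름.py | solution
-- ===== SOURCE A (Python) =====
-- def solution(order):
--     sum = 0
--     for c in order:
--         if c == "iceamericano" or c == "americanoice" or c == "americano" or c == "hotamericano" or c == "anything" or c == "americanohot":
--             sum += 4500
--         else:
--             sum += 5000
--     return sum
-- ===== SOURCE B (Python) =====
-- AMERICANOS = ("iceamericano", "americanoice", "americano", "hotamericano", "anything", "americanohot")
--
-- def solution(order):
--     # Inverted traversal: scan the price table, not the orders.
--     americano_orders = sum(order.count(name) for name in AMERICANOS)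
--     return 4500 * americano_orders + 5000 * (len(order) - americano_orders)
-- ===== Notes on version B (the rewrite author's own statement) =====
-- stated objective: alternative
-- what changed: Inverts the traversal: instead of one pass over the orders branching per item, B iterates over the six americano names tallying order.count(name), then prices the two groups with 4500*a + 5000*(len(order)-a).
import Mathlib
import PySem

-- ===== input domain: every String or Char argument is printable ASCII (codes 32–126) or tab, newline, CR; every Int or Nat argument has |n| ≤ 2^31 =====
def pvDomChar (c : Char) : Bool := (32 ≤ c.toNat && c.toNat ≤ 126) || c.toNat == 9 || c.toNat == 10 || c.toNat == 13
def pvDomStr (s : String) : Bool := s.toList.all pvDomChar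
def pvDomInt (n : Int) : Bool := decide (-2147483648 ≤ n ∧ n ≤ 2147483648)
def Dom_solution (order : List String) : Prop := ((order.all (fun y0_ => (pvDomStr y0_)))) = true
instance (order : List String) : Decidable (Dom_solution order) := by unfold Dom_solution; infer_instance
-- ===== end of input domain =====

-- ===== PORT A =====
-- Per-item branch-and-accumulate, as in A.
def solution (order : List String) : Int :=
  order.foldl (fun sum c =>
    if c == "iceamericano" || c == "americanoice" || c == "americano" || c == "hotamericano" || c == "anything" || c == "americanohot" then
      sum + 4500
    else
      sum + 5000) 0

-- ===== PORT B =====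
-- B: loop over the six americano names, tally order.count(name), then price the two groups.
def americanos : List String := ["iceamericano", "americanoice", "americano", "hotamericano", "anything", "americanohot"]

def solution_alt (order : List String) : Int :=
  let a : Int := americanos.foldl (fun s name => s + (PySem.List.count order name : Int)) 0
  4500 * a + 5000 * ((order.length : Int) - a)

-- ===== PRECONDITION & SPEC =====
def Spec_solution (order : List String) (out : Int) : Prop := out = solution_alt order
instance (order : List String) (out : Int) : Decidable (Spec_solution order out) := by unfold Spec_solution; infer_instance

-- ===== CLAIM (what is proved, stated in full; the proofs are below) =====
def Claim_equal_solution : Prop := ∀ (order : List String), Dom_solution order → Spec_solution order (solution order)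

-- ===== LEMMAS AND PROOFS =====

-- ===== VERDICT (by name: the statement is the Claim_ definition above) =====
-- Boolean "is an americano-type order", used only by the proofs.
def inAm (c : String) : Bool :=
  c == "iceamericano" || c == "americanoice" || c == "americano" || c == "hotamericano" || c == "anything" || c == "americanohot"

-- The six per-name counts of B sum to the number of americano-type items.
lemma countSum_nat (order : List String) :
    PySem.List.count order "iceamericano" + PySem.List.count order "americanoice" +
    PySem.List.count order "americano" + PySem.List.count order "hotamericano" +
    PySem.List.count order "anything" + PySem.List.count order "americanohot"
    = order.countP inAm := by
  induction order with
  | nil => simp [PySem.List.count_eq]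
  | cons c t ih =>
    simp only [PySem.List.count_eq, List.count_cons, List.countP_cons] at *
    by_cases h : inAm c = true
    · rw [if_pos h]
      rcases (by simpa [inAm, or_assoc] using h :
          c = "iceamericano" ∨ c = "americanoice" ∨ c = "americano" ∨
          c = "hotamericano" ∨ c = "anything" ∨ c = "americanohot") with
        h1 | h1 | h1 | h1 | h1 | h1 <;> subst h1 <;> simp <;> omega
    · rw [if_neg h]
      have h' : ¬(c = "iceamericano") ∧ ¬(c = "americanoice") ∧ ¬(c = "americano") ∧
          ¬(c = "hotamericano") ∧ ¬(c = "anything") ∧ ¬(c = "americanohot") := by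
        simpa [inAm, not_or, and_assoc] using h
      simp [beq_iff_eq, h'.1, h'.2.1, h'.2.2.1, h'.2.2.2.1, h'.2.2.2.2.1, h'.2.2.2.2.2]
      omega

-- A's running sum equals 5000 per item minus a 500 discount per americano-type item.
lemma fold_inv (order : List String) (s : Int) :
    order.foldl (fun sum c =>
      if c == "iceamericano" || c == "americanoice" || c == "americano" || c == "hotamericano" || c == "anything" || c == "americanohot" then
        sum + 4500
      else
        sum + 5000) s
    = s + 5000 * (order.length : Int) - 500 * (order.countP inAm : Int) := by
  induction order generalizing s with
  | nil => simp
  | cons c t ih =>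
    simp only [List.foldl, List.length_cons, List.countP_cons]
    by_cases h : inAm c = true
    · rw [if_pos (by simpa [inAm] using h), if_pos h, ih]
      push_cast; ring
    · rw [if_neg (by simpa [inAm] using h), if_neg h, ih]
      push_cast; ring

-- ===== VERDICT =====
theorem solution_spec : Claim_equal_solution := by
  intro order _
  unfold Spec_solution solution solution_alt
  rw [fold_inv order 0]
  have hb : americanos.foldl (fun s name => s + (PySem.List.count order name : Int)) 0
      = (order.countP inAm : Int) := by
    simp only [americanos, List.foldl]
    rw [← countSum_nat order]
    push_cast; ring
  rw [hb]
  push_cast; ring
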